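-- pv_equiv track=rewrite | github.com/Iain-S/python-novice-inflammation | bin/python_check.py | indent_output
-- ===== SOURCE A (Python) =====
-- def indent_output(key, value):
--     """Formats key and value for printing"
--        code_block: 12
--            any_other_key: value_line_1
--                           value_line_2"""
--     if key == 'code_block':
--         return key, value
--
--     else:
--         # Indent the key by four spaces
--         indent = ' ' * 4
--         return_key = indent + key
--
--         # For any value after the first, indent by four spaces + the length of key + 2 (for the ": ")
--         padding = ' ' * (len(key) + 2)
--         value_lines = value.split('\n')
--
--         return_value = value_lines[0]
--
--         for line in value_lines[1:]:
--             return_value += '\n' + indent + padding + line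
--
--         return return_key, return_value
-- ===== SOURCE B (Python) =====
-- def indent_output(key, value):
--     """Formats key and value for printing (same contract as A)."""
--     if key == 'code_block':
--         return key, value
--     # Single character-level pass: no line list, no loop over lines.
--     # Every '\n' in the value is emitted together with the continuation
--     # indentation (4 spaces + len(key) + 2 for ": ").
--     pad = '\n' + ' ' * (4 + len(key) + 2)
--     out = []
--     for ch in value:
--         out.append(pad if ch == '\n' else ch)
--     return ' ' * 4 + key, ''.join(out)
-- ===== Notes on version B (the rewrite author's own statement) =====
-- stated objective: alternative
-- what changed: A splits the value into a list of lines and rebuilds it with a loop over the tail lines; B never forms lines at all: it makes a single character-level pass over the value, emitting each character unchanged and each '\n' together with the continuation indentation, joining the pieces once at the end.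
import Mathlib
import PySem

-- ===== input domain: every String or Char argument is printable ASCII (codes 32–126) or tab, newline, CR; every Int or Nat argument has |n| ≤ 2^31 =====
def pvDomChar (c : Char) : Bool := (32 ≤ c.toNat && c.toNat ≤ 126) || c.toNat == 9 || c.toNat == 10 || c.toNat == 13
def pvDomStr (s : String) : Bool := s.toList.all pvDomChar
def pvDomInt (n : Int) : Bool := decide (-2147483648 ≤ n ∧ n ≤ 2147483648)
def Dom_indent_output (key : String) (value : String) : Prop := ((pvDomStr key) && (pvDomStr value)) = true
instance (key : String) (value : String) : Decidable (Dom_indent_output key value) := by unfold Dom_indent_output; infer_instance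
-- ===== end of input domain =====

-- B replaces A's split-into-lines-then-loop-over-lines reconstruction by a single
-- character-level pass that emits the continuation indentation at each '\n' (alternative; same cost).

-- ===== PORT A =====
def indent_output (key : String) (value : String) : String × String :=
  if key == "code_block" then (key, value)
  else
    let indent := "    "                                             -- ' ' * 4
    let return_key := indent ++ key
    let padding := String.ofList (List.replicate (key.toList.length + 2) ' ')  -- ' ' * (len(key) + 2); len ≥ 0, exact
    let value_lines := (PySem.Str.split? value "\n").getD []         -- sep "\n" ≠ "", so split? is always some: getD is exact
    let return_value := (PySem.List.slice value_lines (some 1) none).foldl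
        (fun acc line => acc ++ "\n" ++ indent ++ padding ++ line)
        (PySem.List.pyGetD value_lines 0 "")                         -- value_lines[0]; a split result is never empty, so no IndexError
    (return_key, return_value)

-- ===== PORT B =====
def indent_output_alt (key : String) (value : String) : String × String :=
  if key == "code_block" then (key, value)
  else
    let pad : List Char := '\n' :: List.replicate (4 + key.toList.length + 2) ' '  -- '\n' + ' ' * (4 + len(key) + 2)
    -- the accumulated list 'out' joined by ''.join is the concatenation of the emitted pieces
    let out := value.toList.foldl (fun acc ch => acc ++ (if ch == '\n' then pad else [ch])) []
    ("    " ++ key, String.ofList out)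

-- ===== PRECONDITION & SPEC =====
def Spec_indent_output (key : String) (value : String) (out : String × String) : Prop := out = indent_output_alt key value
instance (key : String) (value : String) (out : String × String) : Decidable (Spec_indent_output key value out) := by unfold Spec_indent_output; infer_instance

-- ===== CLAIM (what is proved, stated in full; the proofs are below) =====
def Claim_equal_indent_output : Prop := ∀ (key : String) (value : String), Dom_indent_output key value → Spec_indent_output key value (indent_output key value)

-- ===== LEMMAS AND PROOFS =====

-- reference forms of split('\n') and of "replace every '\n' by new", structural over the character list
def pvSplitSpec (pre : List Char) : List Char → List (List Char)
  | [] => [pre]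
  | c :: t => if c = '\n' then pre :: pvSplitSpec [] t else pvSplitSpec (pre ++ [c]) t

def pvReplSpec (new : List Char) : List Char → List Char
  | [] => []
  | c :: t => if c = '\n' then new ++ pvReplSpec new t else c :: pvReplSpec new t

theorem pv_splitOn_go (l : List Char) : ∀ (fuel : Nat), l.length ≤ fuel →
    ∀ (cur : List Char) (acc : List (List Char)),
    PySem.Chars.splitOn.go ['\n'] fuel l cur acc = acc.reverse ++ pvSplitSpec cur.reverse l := by
  induction l with
  | nil =>
    intro fuel _ cur acc
    cases fuel <;> simp [PySem.Chars.splitOn.go, pvSplitSpec]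
  | cons c t ih =>
    intro fuel hf cur acc
    cases fuel with
    | zero => simp at hf
    | succ f =>
      by_cases hc : c = '\n'
      · subst hc
        simp only [PySem.Chars.splitOn.go, List.isPrefixOf, BEq.rfl, Bool.true_and, if_true, List.length_cons, List.length_nil, List.drop_succ_cons, List.drop_zero]
        rw [ih f (by simpa using hf) [] (cur.reverse :: acc)]
        simp [pvSplitSpec]
      · simp only [PySem.Chars.splitOn.go, List.isPrefixOf, Bool.and_eq_true, beq_iff_eq]
        rw [if_neg (by simp; intro h; exact absurd h.symm hc)]
        rw [ih f (by simpa using hf) (c :: cur) acc]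
        simp only [pvSplitSpec, List.reverse_cons]
        rw [if_neg hc]

theorem pv_splitOn_eq (cs : List Char) :
    PySem.Chars.splitOn cs ['\n'] = pvSplitSpec [] cs := by
  unfold PySem.Chars.splitOn
  rw [pv_splitOn_go cs (cs.length + 1) (by omega) [] []]
  simp

-- the fold over the split pieces rebuilds exactly the newline substitution
theorem pv_fold_split (new : List Char) (cs : List Char) : ∀ (pre acc0 : List Char),
    (pvSplitSpec pre cs).foldl (fun a l => a ++ new ++ l) acc0
      = acc0 ++ new ++ pre ++ pvReplSpec new cs := by
  induction cs with
  | nil => intro pre acc0; simp [pvSplitSpec, pvReplSpec]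
  | cons c t ih =>
    intro pre acc0
    by_cases hc : c = '\n'
    · subst hc
      simp only [pvSplitSpec, if_true, List.foldl_cons]
      rw [ih [] (acc0 ++ new ++ pre)]
      simp [pvReplSpec]
    · simp only [pvSplitSpec, hc, if_false]
      rw [ih (pre ++ [c]) acc0]
      simp [pvReplSpec, hc]

theorem pv_headfold_split (new : List Char) (cs : List Char) : ∀ (pre : List Char),
    ((pvSplitSpec pre cs).drop 1).foldl (fun a l => a ++ new ++ l) ((pvSplitSpec pre cs).getD 0 [])
      = pre ++ pvReplSpec new cs := by
  induction cs with
  | nil => intro pre; simp [pvSplitSpec, pvReplSpec]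
  | cons c t ih =>
    intro pre
    by_cases hc : c = '\n'
    · subst hc
      simp only [pvSplitSpec, if_true, List.drop_succ_cons, List.drop_zero, List.getD_cons_zero]
      rw [pv_fold_split new t [] pre]
      simp [pvReplSpec]
    · simp only [pvSplitSpec, hc, if_false]
      rw [ih (pre ++ [c])]
      simp [pvReplSpec, hc]

-- B's character-level fold computes the same newline substitution
theorem pv_charfold (new : List Char) (cs : List Char) : ∀ (acc : List Char),
    cs.foldl (fun a ch => a ++ (if ch == '\n' then new else [ch])) acc
      = acc ++ pvReplSpec new cs := by
  induction cs with
  | nil => intro acc; simp [pvReplSpec]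
  | cons c t ih =>
    intro acc
    rw [List.foldl_cons, ih]
    by_cases hc : c = '\n'
    · subst hc; simp [pvReplSpec]
    · simp [pvReplSpec, hc]

theorem pv_toList_ofList (l : List Char) : (String.ofList l).toList = l := by simp

-- lift a String-level fold to the List Char level
theorem pv_foldl_toList (sfx : String) (ls : List String) : ∀ (a : String),
    (ls.foldl (fun acc line => acc ++ sfx ++ line) a).toList
      = (ls.map String.toList).foldl (fun acc l => acc ++ sfx.toList ++ l) a.toList := by
  induction ls with
  | nil => intro a; rfl
  | cons x xs ih => intro a; simp [ih]

theorem indent_output_eq (key value : String) :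
    indent_output key value = indent_output_alt key value := by
  by_cases hk : key == "code_block"
  · simp [indent_output, indent_output_alt, hk]
  · simp only [indent_output, indent_output_alt, hk, Bool.false_eq_true, if_false]
    refine Prod.ext rfl ?_
    apply String.ext
    -- B side
    rw [pv_toList_ofList, pv_charfold]
    set new : List Char := '\n' :: List.replicate (4 + key.toList.length + 2) ' ' with hnew
    -- A side
    have hsplit : (PySem.Str.split? value "\n").getD []
        = (pvSplitSpec [] value.toList).map String.ofList := by
      simp [PySem.Str.split?, PySem.Chars.split?, pv_splitOn_eq]
    rw [hsplit]
    rw [PySem.List.slice_from _ (by norm_num : (0:Int) ≤ 1)]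
    simp only [Int.toNat_one]
    have hnewstr : ("\n" ++ "    " ++ String.ofList (List.replicate (key.toList.length + 2) ' ')).toList = new := by
      simp [hnew, List.replicate_add]
    have hassoc : ∀ (acc line : String),
        acc ++ "\n" ++ "    " ++ String.ofList (List.replicate (key.toList.length + 2) ' ') ++ line
          = acc ++ ("\n" ++ "    " ++ String.ofList (List.replicate (key.toList.length + 2) ' ')) ++ line := by
      intro acc line; simp [String.ext_iff]
    simp only [hassoc]
    rw [pv_foldl_toList]
    have hmap : ((pvSplitSpec [] value.toList).map String.ofList).map String.toList
        = pvSplitSpec [] value.toList := by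
      simp [Function.comp_def]
    have hget : (PySem.List.pyGetD ((pvSplitSpec [] value.toList).map String.ofList) 0 "").toList
        = (pvSplitSpec [] value.toList).getD 0 [] := by
      rw [PySem.List.pyGetD_ofNat']
      cases h : pvSplitSpec [] value.toList with
      | nil => simp
      | cons x xs => simp
    rw [List.map_drop, hmap, hget, hnewstr]
    exact pv_headfold_split new value.toList []

-- ===== VERDICT (by name: the statement is the Claim_ definition above) =====
theorem indent_output_spec : Claim_equal_indent_output := by
  intro key value _
  exact indent_output_eq key value
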